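-- pv_equiv track=rewrite | github.com/yepeisheng/WCLAnalyser | Inspector.py | is_auto_trans
-- ===== SOURCE A (Python) =====
-- def is_auto_trans(dh):
--     felblade = False
--     demon_blades = False
--     chaos_blades = False
--     for talent in dh["talents"]:
--         if talent["name"] == "Felblade":
--             felblade = True
--         if talent["name"] == "Demon Blades":
--             demon_blades = True
--         if talent["name"] == "Chaos Blades":
--             chaos_blades = True
--     return felblade and demon_blades and chaos_blades
-- ===== SOURCE B (Python) =====
-- def is_auto_trans(dh):
--     talents = dh["talents"]
--     return all(any(t["name"] == r for t in talents)
--                for r in ("Felblade", "Demon Blades", "Chaos Blades"))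
-- ===== Notes on version B (the rewrite author's own statement) =====
-- stated objective: alternative
-- what changed: Inverts the traversal: instead of one pass over the talents threading three boolean flags, B makes one short-circuiting scan of the talent list per required name and conjoins the three results with all(...).
import Mathlib
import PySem

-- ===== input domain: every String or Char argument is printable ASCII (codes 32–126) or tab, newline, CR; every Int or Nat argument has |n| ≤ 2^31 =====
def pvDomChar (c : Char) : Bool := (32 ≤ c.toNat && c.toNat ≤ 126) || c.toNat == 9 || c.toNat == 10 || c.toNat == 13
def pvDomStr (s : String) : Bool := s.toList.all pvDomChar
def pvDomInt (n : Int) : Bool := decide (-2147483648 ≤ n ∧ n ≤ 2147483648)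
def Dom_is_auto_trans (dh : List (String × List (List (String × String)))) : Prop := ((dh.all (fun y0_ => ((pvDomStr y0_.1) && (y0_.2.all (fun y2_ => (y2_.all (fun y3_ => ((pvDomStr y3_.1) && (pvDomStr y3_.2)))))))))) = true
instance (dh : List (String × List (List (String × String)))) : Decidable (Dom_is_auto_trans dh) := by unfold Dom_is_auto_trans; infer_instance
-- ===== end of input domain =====

-- B inverts the traversal: one short-circuiting scan of the talents per required
-- name, conjoined with all(...), instead of one pass threading three boolean flags.

-- ===== PORT A =====
-- transliteration of A: three flags, one loop, a flag is set when the name matches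
def is_auto_trans (dh : List (String × List (List (String × String)))) : Bool :=
  match (PySem.Dict.mk dh).get? "talents" with
  | none => false          -- Python raises KeyError here; excluded by Pre_
  | some ts =>
    let r := ts.foldl (fun (acc : Bool × Bool × Bool) t =>
      let n := (PySem.Dict.mk t).get? "name"
      ((if n == some "Felblade" then true else acc.1),
       (if n == some "Demon Blades" then true else acc.2.1),
       (if n == some "Chaos Blades" then true else acc.2.2)))
      (false, false, false)
    r.1 && r.2.1 && r.2.2

-- ===== PORT B =====
-- transliteration of B: for each required name, one scan of the talents; conjoin
def is_auto_trans_alt (dh : List (String × List (List (String × String)))) : Bool :=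
  match (PySem.Dict.mk dh).get? "talents" with
  | none => false          -- Python raises KeyError here; excluded by Pre_
  | some ts =>
    ["Felblade", "Demon Blades", "Chaos Blades"].all
      (fun r => ts.any (fun t => (PySem.Dict.mk t).get? "name" == some r))

-- ===== PRECONDITION & SPEC =====
-- Pre_ excludes exactly the inputs where Python A raises KeyError: a missing
-- "talents" key, or a talent without a "name" key.
def Pre_is_auto_trans (dh : List (String × List (List (String × String)))) : Prop :=
  ((PySem.Dict.mk dh).get? "talents").isSome = true ∧
  ∀ t ∈ ((PySem.Dict.mk dh).get? "talents").getD [],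
    ((PySem.Dict.mk t).get? "name").isSome = true
instance (dh : List (String × List (List (String × String)))) : Decidable (Pre_is_auto_trans dh) := by
  unfold Pre_is_auto_trans; infer_instance

def pvWitness_is_auto_trans : (List (String × List (List (String × String)))) :=
  [("talents", [[("name", "Felblade")], [("name", "Demon Blades")], [("name", "Chaos Blades")]])]

def Spec_is_auto_trans (dh : List (String × List (List (String × String)))) (out : Bool) : Prop := out = is_auto_trans_alt dh
instance (dh : List (String × List (List (String × String)))) (out : Bool) : Decidable (Spec_is_auto_trans dh out) := by unfold Spec_is_auto_trans; infer_instance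

-- ===== CLAIM (what is proved, stated in full; the proofs are below) =====
def Claim_equal_is_auto_trans : Prop := ∀ (dh : List (String × List (List (String × String)))), Dom_is_auto_trans dh → Pre_is_auto_trans dh → Spec_is_auto_trans dh (is_auto_trans dh)

-- ===== LEMMAS AND PROOFS =====

-- A's loop: each flag ends up true iff some talent has that name
lemma flags_eq (ts : List (List (String × String))) (acc : Bool × Bool × Bool) :
    ts.foldl (fun (acc : Bool × Bool × Bool) t =>
      let n := (PySem.Dict.mk t).get? "name"
      ((if n == some "Felblade" then true else acc.1),
       (if n == some "Demon Blades" then true else acc.2.1),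
       (if n == some "Chaos Blades" then true else acc.2.2))) acc
    = ((acc.1 || ts.any (fun t => (PySem.Dict.mk t).get? "name" == some "Felblade")),
       (acc.2.1 || ts.any (fun t => (PySem.Dict.mk t).get? "name" == some "Demon Blades")),
       (acc.2.2 || ts.any (fun t => (PySem.Dict.mk t).get? "name" == some "Chaos Blades"))) := by
  induction ts generalizing acc with
  | nil => simp
  | cons t ts ih =>
    simp only [List.foldl_cons, List.any_cons, ih]
    obtain ⟨a, b, c⟩ := acc
    by_cases h1 : (PySem.Dict.mk t).get? "name" == some "Felblade" <;>
      by_cases h2 : (PySem.Dict.mk t).get? "name" == some "Demon Blades" <;>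
        by_cases h3 : (PySem.Dict.mk t).get? "name" == some "Chaos Blades" <;>
          simp [h1, h2, h3]

-- ===== VERDICT (by name: the statement is the Claim_ definition above) =====
theorem is_auto_trans_spec : Claim_equal_is_auto_trans := by
  intro dh _ hpre
  unfold Spec_is_auto_trans is_auto_trans is_auto_trans_alt
  obtain ⟨hs, _⟩ := hpre
  obtain ⟨ts, hts⟩ := Option.isSome_iff_exists.mp hs
  rw [hts]
  dsimp only
  rw [flags_eq]
  simp [Bool.and_assoc]
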